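-- pv_equiv track=rewrite | github.com/Sieonn/BJ | Python/BJ/2775.py | apt
-- ===== SOURCE A (Python) =====
-- def apt(k,n):
--     dp = [[0]*(n+1) for _ in range(k+1)]
--     for j in range(n+1):
--         dp[0][j] = j
--     for i in range(1,k+1): #1층
--         for j in range(1,n+1): #1호 부터 4호 전까지
--             for s in range(1,j+1):
--                 dp[i][j] += dp[i-1][s]
--             #1-1 =
--     return dp[k][n]
-- ===== SOURCE B (Python) =====
-- def apt(k, n):
--     row = list(range(n + 1))
--     for _ in range(k):
--         acc = 0
--         out = []
--         for v in row:
--             acc += v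
--             out.append(acc)
--         row = out
--     return row[n]
-- ===== Notes on version B (the rewrite author's own statement) =====
-- stated objective: faster
-- what changed: Replaces the O(k*n^2) triple loop (recomputing a sum over s for every cell) with a single running prefix-sum pass per floor on a one-dimensional row, using dp[i][j] = dp[i][j-1] + dp[i-1][j].
import Mathlib
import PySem

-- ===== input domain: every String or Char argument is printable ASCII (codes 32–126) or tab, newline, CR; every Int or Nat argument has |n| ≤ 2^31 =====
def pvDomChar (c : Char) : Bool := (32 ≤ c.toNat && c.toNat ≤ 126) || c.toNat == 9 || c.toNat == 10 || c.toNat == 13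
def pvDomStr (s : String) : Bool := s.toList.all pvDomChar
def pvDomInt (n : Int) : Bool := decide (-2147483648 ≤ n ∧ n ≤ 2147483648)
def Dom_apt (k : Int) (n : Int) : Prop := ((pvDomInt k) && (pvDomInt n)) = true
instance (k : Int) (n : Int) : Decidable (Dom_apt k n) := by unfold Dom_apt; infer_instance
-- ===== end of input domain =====

-- B replaces A's triple loop (inner sum recomputed per cell) by a running prefix-sum pass per floor.

-- ===== PORT A =====
-- literal port of A's innermost statement: dp[i][j] += dp[i-1][s]
def aptStep (i j : Nat) (dp : List (List Int)) (s : Nat) : List (List Int) :=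
  dp.set i ((dp.getD i []).set j ((dp.getD i []).getD j 0 + (dp.getD (i-1) []).getD s 0))

-- the 'for s in range(1, j+1)' loop
def aptInner (i j : Nat) (dp : List (List Int)) : List (List Int) :=
  (List.range' 1 j).foldl (aptStep i j) dp

-- faithful for k ≥ 0 ∧ n ≥ 0 (= Pre_apt; Python A raises IndexError otherwise)
def apt (k : Int) (n : Int) : Int :=
  let K := k.toNat
  let N := n.toNat
  let dp : List (List Int) := (List.range (K+1)).map (fun _ => List.replicate (N+1) (0:Int))
  let dp := (List.range (N+1)).foldl (fun dp j => dp.set 0 ((dp.getD 0 []).set j (Int.ofNat j))) dp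
  let dp := (List.range' 1 K).foldl
      (fun dp i => (List.range' 1 N).foldl (fun dp j => aptInner i j dp) dp) dp
  (dp.getD K []).getD N 0

-- ===== PORT B =====
-- one running prefix-sum pass over a row (Source B's inner loop: acc += v; out.append(acc))
def scanSum (row : List Int) : List Int :=
  (row.foldl (fun (p : Int × List Int) v => (p.1 + v, p.2 ++ [p.1 + v])) ((0:Int), ([] : List Int))).2

def apt_alt (k : Int) (n : Int) : Int :=
  let row : List Int := (List.range (n.toNat+1)).map (fun (j : Nat) => (j : Int))
  ((List.range k.toNat).foldl (fun r _ => scanSum r) row).getD n.toNat 0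

-- ===== PRECONDITION & SPEC =====
-- Pre_apt: exactly the inputs on which Python A returns (it raises IndexError when k < 0 or n < 0)
def Pre_apt (k : Int) (n : Int) : Prop := 0 ≤ k ∧ 0 ≤ n
instance (k : Int) (n : Int) : Decidable (Pre_apt k n) := by unfold Pre_apt; infer_instance
def pvWitness_apt : Int × Int := (3, 5)

def Spec_apt (k : Int) (n : Int) (out : Int) : Prop := out = apt_alt k n
instance (k : Int) (n : Int) (out : Int) : Decidable (Spec_apt k n out) := by unfold Spec_apt; infer_instance

-- ===== CLAIM (what is proved, stated in full; the proofs are below) =====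
def Claim_equal_apt : Prop := ∀ (k : Int) (n : Int), Dom_apt k n → Pre_apt k n → Spec_apt k n (apt k n)

-- ===== LEMMAS AND PROOFS =====

-- the mathematical recurrence both programs compute: floor 0 is 1..n, floor i+1 is prefix sums
def f : Nat → Nat → Int
  | 0, j => (j : Int)
  | i+1, j => ((List.range (j+1)).map (f i)).sum

lemma f_zero (i : Nat) : f i 0 = 0 := by
  induction i with
  | zero => rfl
  | succ i ih => simp [f, List.range_succ, ih]

lemma f_succ_row (i j : Nat) : ((List.range' 1 j).map (f i)).sum = f (i+1) j := by
  rw [show f (i+1) j = ((List.range (j+1)).map (f i)).sum from rfl]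
  rw [List.range_eq_range', List.range'_succ]
  simp [f_zero]

lemma getD_map_range (g : Nat → Int) (n t : Nat) (h : t < n) :
    ((List.range n).map g).getD t 0 = g t := by
  rw [List.getD_eq_getElem _ _ (by simpa using h)]
  simp

-- ---- A side ----

lemma getD_set_self (dp : List (List Int)) (i : Nat) (x : List Int) (hi : i < dp.length) :
    (dp.set i x).getD i [] = x := by
  rw [List.getD_eq_getElem _ _ (by simpa using hi)]
  exact List.getElem_set_self _

lemma getD_set_ne (dp : List (List Int)) (i r : Nat) (x : List Int) (h : i ≠ r) :
    (dp.set i x).getD r [] = dp.getD r [] := by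
  simp [List.getD, List.getElem?_set_ne h]

-- the s-loop adds the sum of dp[i-1][s] over s ∈ L onto dp[i][j]
lemma step_fold (i j : Nat) (h1 : 1 ≤ i) (L : List Nat) (dp : List (List Int))
    (hi : i < dp.length) (hj : j < (dp.getD i []).length) :
    L.foldl (aptStep i j) dp
      = dp.set i ((dp.getD i []).set j ((dp.getD i []).getD j 0 +
          (L.map (fun s => (dp.getD (i-1) []).getD s 0)).sum)) := by
  induction L generalizing dp with
  | nil =>
      have hrow : dp.getD i [] = dp[i] := List.getD_eq_getElem _ _ hi
      rw [hrow] at hj ⊢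
      simp [List.getElem?_eq_getElem hj, List.set_getElem_self]
  | cons s L ih =>
      have h1' : List.foldl (aptStep i j) dp (s :: L)
          = List.foldl (aptStep i j)
              (dp.set i ((dp.getD i []).set j ((dp.getD i []).getD j 0 + (dp.getD (i-1) []).getD s 0))) L := rfl
      rw [h1']
      set c := (dp.getD i []).getD j 0 + (dp.getD (i-1) []).getD s 0 with hc
      set dp' := dp.set i ((dp.getD i []).set j c) with hdp'
      have hi2 : i < dp'.length := by simpa [hdp'] using hi
      have hrow' : dp'.getD i [] = (dp.getD i []).set j c := getD_set_self _ _ _ hi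
      have hj2 : j < (dp'.getD i []).length := by rw [hrow']; simpa using hj
      rw [ih dp' hi2 hj2]
      have hne : i ≠ i - 1 := by omega
      have hprev' : dp'.getD (i-1) [] = dp.getD (i-1) [] := getD_set_ne _ _ _ _ hne
      have hjc : ((dp.getD i []).set j c).getD j 0 = c := by
        rw [List.getD_eq_getElem _ _ (by simpa using hj)]
        exact List.getElem_set_self _
      rw [hrow', hprev', hjc, hdp', List.set_set, List.set_set]
      rw [hc]
      congr 2
      simp [add_assoc]

-- partial row i after the j-loop has processed columns 1..m
def prow (i N m : Nat) : List Int :=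
  (List.range (N+1)).map (fun t => if t ≤ m then f i t else 0)

lemma prow_zero (i N : Nat) : prow i N 0 = List.replicate (N+1) 0 := by
  apply List.ext_getElem
  · simp [prow]
  · intro t h1 h2
    simp only [prow, List.getElem_map, List.getElem_range, List.getElem_replicate]
    by_cases h : t ≤ 0
    · have ht : t = 0 := by omega
      simp [ht, f_zero]
    · simp [h]

lemma prow_set (i N m : Nat) (hm : m + 1 ≤ N) :
    (prow i N m).set (m+1) (f i (m+1)) = prow i N (m+1) := by
  apply List.ext_getElem
  · simp [prow]
  · intro t h1 h2
    by_cases h : t = m + 1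
    · subst h
      rw [List.getElem_set_self]
      simp only [prow, List.getElem_map, List.getElem_range]
      simp
    · rw [List.getElem_set_ne (by omega)]
      simp only [prow, List.getElem_map, List.getElem_range]
      by_cases h' : t ≤ m
      · simp [h', show t ≤ m + 1 by omega]
      · simp [h', show ¬ t ≤ m + 1 by omega]

lemma prow_last (i N : Nat) : prow i N N = (List.range (N+1)).map (f i) := by
  apply List.map_congr_left
  intro t ht
  rw [List.mem_range] at ht
  simp [show t ≤ N by omega]

-- the j-loop fills row i with f i, given row i-1 already holds f (i-1)
lemma jloop (i N K m : Nat) (h1 : 1 ≤ i) (hm : m ≤ N) (dp : List (List Int))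
    (hlen : dp.length = K+1) (hiK : i ≤ K)
    (hprev : dp.getD (i-1) [] = (List.range (N+1)).map (f (i-1)))
    (hrow : dp.getD i [] = List.replicate (N+1) 0) :
    (List.range' 1 m).foldl (fun dp j => aptInner i j dp) dp = dp.set i (prow i N m) := by
  have hi : i < dp.length := by omega
  induction m with
  | zero =>
      simp only [List.range', List.foldl_nil]
      rw [prow_zero, ← hrow, List.getD_eq_getElem _ _ hi, List.set_getElem_self]
  | succ m ih =>
      have hm' : m ≤ N := by omega
      rw [List.range'_concat, List.foldl_append]
      rw [ih hm']
      simp only [List.foldl_cons, List.foldl_nil]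
      set dp1 := dp.set i (prow i N m) with hdp1
      have hi1 : i < dp1.length := by simpa [hdp1] using hi
      have hrow1 : dp1.getD i [] = prow i N m := getD_set_self _ _ _ hi
      have hj1 : 1 + 1 * m < (dp1.getD i []).length := by
        rw [hrow1]; simp [prow]; omega
      rw [aptInner, step_fold i (1 + 1 * m) h1 _ dp1 hi1 hj1]
      have hne : i ≠ i - 1 := by omega
      have hprev1 : dp1.getD (i-1) [] = (List.range (N+1)).map (f (i-1)) := by
        rw [hdp1, getD_set_ne _ _ _ _ hne, hprev]
      have hsum : ((List.range' 1 (1 + 1 * m)).map (fun s => (dp1.getD (i-1) []).getD s 0)).sum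
          = f i (1 + 1 * m) := by
        rw [hprev1]
        have hmap : (List.range' 1 (1 + 1 * m)).map (fun s => ((List.range (N+1)).map (f (i-1))).getD s 0)
            = (List.range' 1 (1 + 1 * m)).map (f (i-1)) := by
          apply List.map_congr_left
          intro s hs
          rw [List.mem_range'_1] at hs
          exact getD_map_range _ _ _ (by omega)
        rw [hmap, f_succ_row]
        congr 1
        omega
      rw [hsum, hrow1]
      have hz : (prow i N m).getD (1 + 1 * m) 0 = 0 := by
        rw [prow, getD_map_range _ _ _ (by omega)]
        simp only [if_neg (show ¬ (1 + 1 * m ≤ m) by omega)]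
      rw [hz, zero_add, hdp1, List.set_set]
      congr 1
      have h11 : 1 + 1 * m = m + 1 := by omega
      rw [h11, prow_set i N m (by omega)]

-- matrix state after the outer loop has processed floors 1..m
def mat (N K m : Nat) : List (List Int) :=
  (List.range (K+1)).map (fun r => if r ≤ m then (List.range (N+1)).map (f r) else List.replicate (N+1) 0)

lemma mat_getD (N K m r : Nat) (h : r < K+1) :
    (mat N K m).getD r []
      = if r ≤ m then (List.range (N+1)).map (f r) else List.replicate (N+1) 0 := by
  rw [List.getD_eq_getElem _ _ (by simp [mat]; omega)]
  simp [mat]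

lemma mat_set (N K m : Nat) (hm : m + 1 ≤ K) :
    (mat N K m).set (m+1) ((List.range (N+1)).map (f (m+1))) = mat N K (m+1) := by
  apply List.ext_getElem
  · simp [mat]
  · intro r hr1 hr2
    by_cases h : r = m + 1
    · subst h
      rw [List.getElem_set_self]
      simp [mat]
    · rw [List.getElem_set_ne (by omega)]
      simp only [mat, List.getElem_map, List.getElem_range]
      by_cases h' : r ≤ m
      · simp [h', show r ≤ m + 1 by omega]
      · simp [h', show ¬ r ≤ m + 1 by omega]

lemma outer_loop (N K m : Nat) (hm : m ≤ K) :
    (List.range' 1 m).foldl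
      (fun dp i => (List.range' 1 N).foldl (fun dp j => aptInner i j dp) dp) (mat N K 0)
      = mat N K m := by
  induction m with
  | zero => simp [List.range']
  | succ m ih =>
      rw [List.range'_concat, List.foldl_append, ih (by omega)]
      simp only [List.foldl_cons, List.foldl_nil]
      have h11 : 1 + 1 * m = m + 1 := by omega
      rw [h11]
      have hj := jloop (m+1) N K N (by omega) le_rfl (mat N K m)
        (by simp [mat]) (by omega)
        (by rw [show m + 1 - 1 = m from rfl, mat_getD _ _ _ _ (by omega)]; simp)
        (by rw [mat_getD _ _ _ _ (by omega)]; simp [show ¬ (m + 1 ≤ m) by omega])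
      rw [hj, prow_last, mat_set _ _ _ (by omega)]

-- the init loop: row 0 becomes 0,1,…,m-1 in its first m slots
lemma init_loop (N K m : Nat) (hm : m ≤ N+1) :
    (List.range m).foldl (fun dp j => dp.set 0 ((dp.getD 0 []).set j (Int.ofNat j)))
      ((List.range (K+1)).map (fun _ => List.replicate (N+1) (0:Int)))
      = ((List.range (K+1)).map (fun _ => List.replicate (N+1) (0:Int))).set 0
          ((List.range (N+1)).map (fun t => if t < m then (t:Int) else 0)) := by
  set dp0 : List (List Int) := (List.range (K+1)).map (fun _ => List.replicate (N+1) (0:Int)) with hdp0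
  have hlen : 0 < dp0.length := by simp [hdp0]
  have h00 : dp0.getD 0 [] = List.replicate (N+1) 0 := by
    rw [List.getD_eq_getElem _ _ hlen]
    simp [hdp0]
  induction m with
  | zero =>
      simp only [List.range_zero, List.foldl_nil]
      have : (List.range (N+1)).map (fun (t : Nat) => if t < 0 then (t:Int) else 0)
          = List.replicate (N+1) 0 := by
        apply List.ext_getElem
        · rw [List.length_map, List.length_range, List.length_replicate]
        · intro t h1 h2
          simp only [List.getElem_map, List.getElem_range, List.getElem_replicate]
          rfl
      rw [this, ← h00, List.getD_eq_getElem _ _ hlen, List.set_getElem_self]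
  | succ m ih =>
      rw [List.range_succ, List.foldl_append, ih (by omega)]
      simp only [List.foldl_cons, List.foldl_nil]
      rw [getD_set_self _ _ _ hlen, List.set_set]
      congr 1
      apply List.ext_getElem
      · simp
      · intro t h1 h2
        have h1' : t < N + 1 := by simpa using h1
        by_cases h : t = m
        · subst h
          rw [List.getElem_set_self]
          simp
        · rw [List.getElem_set_ne (by omega)]
          simp only [List.getElem_map, List.getElem_range]
          by_cases h' : t < m
          · simp [h', show t < m + 1 by omega]
          · simp [h', show ¬ t < m + 1 by omega]

lemma apt_eq_f (k n : Int) : apt k n = f k.toNat n.toNat := by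
  unfold apt
  dsimp only
  generalize k.toNat = K
  generalize n.toNat = N
  rw [init_loop N K (N+1) le_rfl]
  have h0 : (List.range (N+1)).map (fun t => if t < N+1 then (t:Int) else 0)
      = (List.range (N+1)).map (f 0) := by
    apply List.map_congr_left
    intro t ht
    rw [List.mem_range] at ht
    simp [f, ht]
  rw [h0]
  have hm0 : ((List.range (K+1)).map (fun _ => List.replicate (N+1) (0:Int))).set 0
      ((List.range (N+1)).map (f 0)) = mat N K 0 := by
    apply List.ext_getElem
    · simp [mat]
    · intro r hr1 hr2
      by_cases h : r = 0
      · subst h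
        rw [List.getElem_set_self]
        simp [mat]
      · rw [List.getElem_set_ne (by omega)]
        simp [mat, h]
  rw [hm0, outer_loop N K K le_rfl]
  rw [mat_getD _ _ _ _ (by omega)]
  simp only [le_rfl, if_pos]
  exact getD_map_range _ _ _ (by omega)

-- ---- B side ----

lemma scan_aux (l : List Int) (acc : Int) (out : List Int) :
    l.foldl (fun (p : Int × List Int) v => (p.1 + v, p.2 ++ [p.1 + v])) (acc, out)
      = (acc + l.sum, out ++ (List.range l.length).map (fun j => acc + (l.take (j+1)).sum)) := by
  induction l generalizing acc out with
  | nil => simp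
  | cons v t ih =>
      simp only [List.foldl_cons]
      rw [ih, Prod.mk.injEq]
      refine ⟨by simp [add_assoc], ?_⟩
      rw [List.length_cons, List.range_succ_eq_map, List.map_cons, List.map_map,
          List.append_assoc, List.singleton_append]
      congr 1
      congr 1
      · simp
      · apply List.map_congr_left
        intro j _
        simp only [Function.comp_apply, Nat.succ_eq_add_one, List.take_succ_cons, List.sum_cons]
        ring

lemma scanSum_row (i N : Nat) :
    scanSum ((List.range (N+1)).map (f i)) = (List.range (N+1)).map (f (i+1)) := by
  unfold scanSum
  rw [scan_aux]
  simp only [List.nil_append, List.length_map, List.length_range]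
  apply List.map_congr_left
  intro j hj
  rw [List.mem_range] at hj
  rw [← List.map_take, List.take_range]
  rw [show min (j+1) (N+1) = j + 1 by omega]
  rw [zero_add]
  rfl

lemma apt_alt_eq_f (k n : Int) : apt_alt k n = f k.toNat n.toNat := by
  unfold apt_alt
  dsimp only
  generalize k.toNat = K
  generalize n.toNat = N
  have h0 : (List.range (N+1)).map (fun (j : Nat) => (j:Int)) = (List.range (N+1)).map (f 0) := rfl
  rw [h0]
  have hloop : ∀ m : Nat, (List.range m).foldl (fun r _ => scanSum r) ((List.range (N+1)).map (f 0))
      = (List.range (N+1)).map (f m) := by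
    intro m
    induction m with
    | zero => rfl
    | succ m ih =>
        rw [show List.range (m+1) = List.range m ++ [m] from List.range_succ,
            List.foldl_append, ih]
        simp only [List.foldl_cons, List.foldl_nil]
        exact scanSum_row m N
  rw [hloop K]
  exact getD_map_range _ _ _ (by omega)

-- ===== VERDICT (by name: the statement is the Claim_ definition above) =====
theorem apt_spec : Claim_equal_apt := by
  intro k n _ _
  unfold Spec_apt
  rw [apt_eq_f, apt_alt_eq_f]
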